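-- pv_equiv track=rewrite | github.com/azizbakh/Projects | etudes_technique/projet.py | count_annotation
-- ===== SOURCE A (Python) =====
-- import operator
-- from collections import Counter
--
-- def count_annotation(list_tuple):
--     '''
--     function that count all the annotations from the output of entities linking function
--     '''
--     annotation_list =[]
--     #put in list for all annotations
--     for annotation in list_tuple:
--         annotation_list.append(annotation[0])
--     #merge annotations regardless of the capital letters
--     orig = Counter(annotation_list)
--     lower = Counter(map(str.lower, annotation_list))
--     merge_list = {}
--     for k_orig in orig:
--         k_lower = k_orig.lower()
--         if lower[k_lower] == orig[k_orig]:
--             merge_list[k_orig] = orig[k_orig]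
--         else:
--             merge_list[k_lower] = lower[k_lower]
--     #sort the annotations depends on how many times they appear in descending order
--     sorted_annotations = dict(sorted(merge_list.items(), key=operator.itemgetter(1),reverse=True) )
--
--     return sorted_annotations
-- ===== SOURCE B (Python) =====
-- def count_annotation(list_tuple):
--     # one pass over the raw annotations: low -> [first_spelling, total, pure]
--     info = {}
--     for t in list_tuple:
--         a = t[0]
--         low = a.lower()
--         rec = info.get(low)
--         if rec is None:
--             info[low] = [a, 1, True]
--         else:
--             rec[1] += 1
--             if rec[0] != a:
--                 rec[2] = False
--     # distribution sort: bucket the merged entries by their count,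
--     # then emit buckets by decreasing count (stable by construction)
--     buckets = {}
--     for low, (first, total, pure) in info.items():
--         key = first if pure else low
--         buckets.setdefault(total, []).append((key, total))
--     out = {}
--     for c in sorted(buckets, reverse=True):
--         for k, v in buckets[c]:
--             out[k] = v
--     return out
-- ===== Notes on version B (the rewrite author's own statement) =====
-- stated objective: alternative
-- what changed: B makes a single pass over the raw annotations keeping per-lowercase state (first spelling, running total, purity flag) instead of A's two Counters plus distinct-key comparison loop, and replaces A's comparison sort of the merged items by a distribution (bucket) sort keyed on the count.
import Mathlib
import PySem

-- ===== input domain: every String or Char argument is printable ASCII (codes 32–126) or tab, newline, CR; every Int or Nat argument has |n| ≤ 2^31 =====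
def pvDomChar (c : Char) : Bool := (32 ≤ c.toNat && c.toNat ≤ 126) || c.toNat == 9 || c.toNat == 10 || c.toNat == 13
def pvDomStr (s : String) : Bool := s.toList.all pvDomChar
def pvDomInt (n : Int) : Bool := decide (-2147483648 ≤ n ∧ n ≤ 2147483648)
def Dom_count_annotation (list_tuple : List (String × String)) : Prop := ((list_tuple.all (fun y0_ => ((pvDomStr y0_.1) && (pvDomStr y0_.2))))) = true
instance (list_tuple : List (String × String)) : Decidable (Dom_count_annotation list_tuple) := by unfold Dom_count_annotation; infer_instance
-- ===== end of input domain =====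

-- B replaces A's two Counters plus distinct-key comparison loop by a single pass over the raw
-- annotations keeping (first spelling, running total, purity) per lowercase form, and replaces
-- A's comparison sort of the merged items by a distribution (bucket) sort keyed on the count.

-- ===== PORT A =====
def count_annotation (list_tuple : List (String × String)) : List (String × Int) :=
  let annotation_list : List String :=
    list_tuple.foldl (fun acc annotation => acc ++ [annotation.1]) []
  let orig : PySem.Dict String Int := PySem.Dict.counter annotation_list
  let lower : PySem.Dict String Int := PySem.Dict.counter (annotation_list.map PySem.Str.lower)
  let merge_list : PySem.Dict String Int :=
    orig.keys.foldl (fun merge_list k_orig =>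
      let k_lower := PySem.Str.lower k_orig
      if lower.getD k_lower 0 == orig.getD k_orig 0 then
        merge_list.insert k_orig (orig.getD k_orig 0)
      else
        merge_list.insert k_lower (lower.getD k_lower 0)) PySem.Dict.empty
  (PySem.Dict.ofList (PySem.List.sorted merge_list.items (fun p => p.2) true)).items

-- ===== PORT B =====
def count_annotation_alt (list_tuple : List (String × String)) : List (String × Int) :=
  -- one pass over the raw annotations: low -> (first spelling, total, pure)
  let info : PySem.Dict String (String × Int × Bool) :=
    list_tuple.foldl (fun info t =>
      match info.get? (PySem.Str.lower t.1) with
      | none => info.insert (PySem.Str.lower t.1) (t.1, 1, true)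
      | some r => info.insert (PySem.Str.lower t.1)
          (r.1, r.2.1 + 1, if r.1 != t.1 then false else r.2.2))
      PySem.Dict.empty
  -- distribution sort: bucket the merged entries by count, emit buckets by decreasing count
  let buckets : PySem.Dict Int (List (String × Int)) :=
    info.items.foldl (fun b p =>
      b.modify p.2.2.1 [] (fun l => l ++ [(if p.2.2.2 then p.2.1 else p.1, p.2.2.1)]))
      PySem.Dict.empty
  let out : PySem.Dict String Int :=
    (PySem.List.sorted buckets.keys (fun c => c) true).foldl (fun out c =>
      (buckets.getD c []).foldl (fun out kv => out.insert kv.1 kv.2) out) PySem.Dict.empty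
  out.items

-- ===== PRECONDITION & SPEC =====
def Spec_count_annotation (list_tuple : List (String × String)) (out : List (String × Int)) : Prop := out = count_annotation_alt list_tuple
instance (list_tuple : List (String × String)) (out : List (String × Int)) : Decidable (Spec_count_annotation list_tuple out) := by unfold Spec_count_annotation; infer_instance

-- ===== CLAIM (what is proved, stated in full; the proofs are below) =====
def Claim_equal_count_annotation : Prop := ∀ (list_tuple : List (String × String)), Dom_count_annotation list_tuple → Spec_count_annotation list_tuple (count_annotation list_tuple)

-- ===== LEMMAS AND PROOFS =====

def pvLow (s : String) : String := PySem.Str.lower s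
def pvLowCnt (anns : List String) (c : String) : Int := ((anns.map pvLow).count c : Int)
def pvCond (anns : List String) (k : String) : Bool :=
  pvLowCnt anns (pvLow k) == (anns.count k : Int)
def pvKeyA (anns : List String) (k : String) : String := if pvCond anns k then k else pvLow k
def pvValA (anns : List String) (k : String) : Int :=
  if pvCond anns k then (anns.count k : Int) else pvLowCnt anns (pvLow k)
-- the merged entry A produces for lowercase class c whose DISTINCT spellings are g
def pvEntry (anns : List String) (c : String) (g : List String) : String × Int :=
  match g with
  | [k] => if pvCond anns k then (k, (anns.count k : Int)) else (c, pvLowCnt anns c)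
  | _ => (c, pvLowCnt anns c)
-- the lowercase classes in first-appearance order, the raw group of a class, B's per-class state
def pvClasses (anns : List String) : List String := PySem.Set.ofList (anns.map pvLow)
def pvGrp (anns : List String) (c : String) : List String := anns.filter (fun a => pvLow a == c)
def pvInfoVal (anns : List String) (c : String) : String × Int × Bool :=
  ((pvGrp anns c).headD "", (((pvGrp anns c).length : Int),
    (pvGrp anns c).all (fun a => a == (pvGrp anns c).headD "")))
def pvStep (info : PySem.Dict String (String × Int × Bool)) (a : String) :
    PySem.Dict String (String × Int × Bool) :=
  match info.get? (pvLow a) with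
  | none => info.insert (pvLow a) (a, 1, true)
  | some r => info.insert (pvLow a) (r.1, r.2.1 + 1, if r.1 != a then false else r.2.2)
-- the merged item list both programs order by count
def pvM (anns : List String) : List (String × Int) :=
  (pvClasses anns).map
    (fun c => pvEntry anns c ((PySem.Set.ofList anns).filter (fun k => pvLow k == c)))

theorem lowerChar_idem (c : Char) :
    PySem.Chars.lowerChar (PySem.Chars.lowerChar c) = PySem.Chars.lowerChar c := by
  unfold PySem.Chars.lowerChar PySem.Chars.isupper
  by_cases h : ('A' ≤ c ∧ c ≤ 'Z')
  · obtain ⟨h1, h2⟩ := h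
    have h1n : 65 ≤ c.toNat := Fin.mk_le_mk.mp h1
    have h2n : c.toNat ≤ 90 := Fin.mk_le_mk.mp h2
    have hv : (c.toNat + 32).isValidChar := by left; omega
    have ht : (Char.ofNat (c.toNat + 32)).toNat = c.toNat + 32 := by
      rw [Char.toNat_ofNat, if_pos hv]
    have hd1 : decide ('A' ≤ c) = true := by simp [h1]
    have hd2 : decide (c ≤ 'Z') = true := by simp [h2]
    rw [hd1, hd2]
    simp only [Bool.and_self, if_true]
    have hnot : ¬ (Char.ofNat (c.toNat + 32) ≤ 'Z') := by
      intro hle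
      have h90 : (Char.ofNat (c.toNat + 32)).toNat ≤ 90 := Fin.mk_le_mk.mp hle
      rw [ht] at h90
      omega
    simp [hnot]
  · have : ¬ (decide ('A' ≤ c) && decide (c ≤ 'Z')) = true := by
      simp only [Bool.and_eq_true, decide_eq_true_eq]; exact h
    rw [if_neg this, if_neg this]

theorem low_idem (s : String) : pvLow (pvLow s) = pvLow s := by
  unfold pvLow
  apply String.toList_injective
  simp [PySem.Str.toList_lower, PySem.Chars.lower, List.map_map, Function.comp_def, lowerChar_idem]

theorem cond_iff (anns : List String) (k : String) :
    pvCond anns k = true ↔ ∀ a ∈ anns, pvLow a = pvLow k → a = k := by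
  unfold pvCond pvLowCnt
  rw [beq_iff_eq, Int.natCast_inj]
  rw [List.count_eq_countP, List.countP_map, List.count_eq_countP]
  have h1 : List.countP (fun x => x == k) anns
      = List.countP (fun a => (pvLow a == pvLow k) && (a == k)) anns := by
    apply List.countP_congr
    intro a _
    constructor
    · intro h
      have : a = k := by simpa using h
      subst this; simp
    · intro h
      simp only [Bool.and_eq_true] at h
      exact h.2
  have h2 : List.countP (fun a => (pvLow a == pvLow k) && (a == k)) anns
      = List.countP (fun a => a == k) (anns.filter (fun a => pvLow a == pvLow k)) := by
    rw [List.countP_filter]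
    apply List.countP_congr
    intro a _
    simp [Bool.and_comm]
  have h3 : ((· == pvLow k) ∘ pvLow) = (fun a => pvLow a == pvLow k) := rfl
  rw [h3, h1, h2, List.countP_eq_length_filter (l := anns)]
  rw [List.length_eq_countP_add_countP (fun a => a == k)
      (l := anns.filter (fun a => pvLow a == pvLow k))]
  constructor
  · intro h
    have hz : List.countP (fun a => decide ¬(a == k) = true)
        (anns.filter (fun a => pvLow a == pvLow k)) = 0 := by omega
    rw [List.countP_eq_zero] at hz
    intro a ha hla
    by_contra hne
    have hmem : a ∈ anns.filter (fun a => pvLow a == pvLow k) := by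
      simp [List.mem_filter, ha, hla]
    have := hz a hmem
    simp [hne] at this
  · intro h
    have hz : List.countP (fun a => decide ¬(a == k) = true)
        (anns.filter (fun a => pvLow a == pvLow k)) = 0 := by
      rw [List.countP_eq_zero]
      intro a hmem
      rw [List.mem_filter] at hmem
      have := h a hmem.1 (by simpa using hmem.2)
      simp [this]
    omega

theorem pvEntry_fst (anns : List String) (c : String) (g : List String) :
    (pvEntry anns c g).1 = c ∨ (pvEntry anns c g).1 ∈ g := by
  cases g with
  | nil => left; rfl
  | cons a t =>
    cases t with
    | nil => by_cases h : pvCond anns a = true <;> simp [pvEntry, h]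
    | cons b t2 => left; rfl

theorem pvEntry_not_single (anns : List String) (c : String) (g : List String)
    (h : g.length ≠ 1) : pvEntry anns c g = (c, pvLowCnt anns c) := by
  cases g with
  | nil => rfl
  | cons a t =>
    cases t with
    | nil => simp at h
    | cons b t2 => rfl

theorem lowCnt_eq_grp_length (anns : List String) (c : String) :
    pvLowCnt anns c = ((pvGrp anns c).length : Int) := by
  unfold pvLowCnt pvGrp
  rw [List.count_eq_countP, List.countP_map, List.countP_eq_length_filter]
  rfl

theorem low_of_mem_classes (anns : List String) (c : String) (h : c ∈ pvClasses anns) :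
    pvLow c = c := by
  unfold pvClasses at h
  rw [PySem.Set.mem_ofList, List.mem_map] at h
  obtain ⟨a, _, rfl⟩ := h
  exact low_idem a

-- the classes of the deduplicated list are the classes of the list
theorem classes_ofList (anns : List String) :
    PySem.Set.ofList ((PySem.Set.ofList anns).map pvLow) = pvClasses anns := by
  unfold pvClasses
  induction anns using List.reverseRecOn with
  | nil => rfl
  | append_singleton l a ih =>
    rw [PySem.Set.ofList_append_singleton]
    by_cases h : a ∈ PySem.Set.ofList l
    · have ha : pvLow a ∈ PySem.Set.ofList (l.map pvLow) := by
        rw [PySem.Set.mem_ofList]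
        exact List.mem_map_of_mem ((PySem.Set.mem_ofList l a).mp h)
      rw [PySem.Set.add_of_mem h, ih]
      simp only [List.map_append, List.map_cons, List.map_nil]
      rw [PySem.Set.ofList_append_singleton, PySem.Set.add_of_mem ha]
    · rw [PySem.Set.add_of_not_mem h]
      simp only [List.map_append, List.map_cons, List.map_nil]
      rw [PySem.Set.ofList_append_singleton, PySem.Set.ofList_append_singleton, ih]

-- characterization of A's merge loop (over any nodup key list P drawn from anns)
theorem mergeA_items (anns : List String) (P : List String)
    (hnd : P.Nodup) (hsub : ∀ k ∈ P, k ∈ anns) :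
    (P.foldl (fun d k => d.insert (pvKeyA anns k) (pvValA anns k)) PySem.Dict.empty).items
      = (PySem.Set.ofList (P.map pvLow)).map
          (fun c => pvEntry anns c (P.filter (fun k => pvLow k == c))) := by
  induction P using List.reverseRecOn with
  | nil => rfl
  | append_singleton P k ih =>
    have hndP : P.Nodup := (List.nodup_append.mp hnd).1
    have hkP : k ∉ P := by
      have hd := (List.nodup_append.mp hnd).2.2
      intro hk
      exact hd k hk k (List.mem_singleton_self k) rfl
    have hsubP : ∀ j ∈ P, j ∈ anns := fun j hj => hsub j (List.mem_append_left _ hj)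
    have hkanns : k ∈ anns := hsub k (List.mem_append_right _ (List.mem_singleton_self k))
    have hm := ih hndP hsubP
    set c0 := pvLow k with hc0
    set S := PySem.Set.ofList (P.map pvLow) with hS
    set m := P.foldl (fun d j => d.insert (pvKeyA anns j) (pvValA anns j)) PySem.Dict.empty with hmdef
    rw [List.foldl_append, List.map_append]
    simp only [List.map_cons, List.map_nil, List.foldl_cons, List.foldl_nil]
    rw [PySem.Set.ofList_append_singleton, ← hmdef, ← hS, ← hc0]
    have hSmem : ∀ c, c ∈ S ↔ ∃ j ∈ P, pvLow j = c := by
      intro c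
      rw [hS, PySem.Set.mem_ofList]
      simp [List.mem_map]
    have hfilter_ne : ∀ c, c ≠ c0 →
        (P ++ [k]).filter (fun j => pvLow j == c) = P.filter (fun j => pvLow j == c) := by
      intro c hne
      rw [List.filter_append]
      have : [k].filter (fun j => pvLow j == c) = [] := by
        simp only [List.filter, ← hc0]
        have : (c0 == c) = false := by simp; exact fun h => hne h.symm
        rw [this]
      rw [this, List.append_nil]
    have hfilter_eq :
        (P ++ [k]).filter (fun j => pvLow j == c0) = P.filter (fun j => pvLow j == c0) ++ [k] := by
      rw [List.filter_append]
      simp only [List.filter, ← hc0, beq_self_eq_true]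
    have hkeys : m.keys = S.map (fun c => (pvEntry anns c (P.filter (fun j => pvLow j == c))).1) := by
      show m.items.map (fun p => p.1) = _
      rw [hm, List.map_map]
      rfl
    -- an entry's key equals c0 only for the class of c0 itself
    have hkey_ne : ∀ c ∈ S, c ≠ c0 →
        (pvEntry anns c (P.filter (fun j => pvLow j == c))).1 ≠ c0 := by
      intro c hcS hne habs
      rcases pvEntry_fst anns c (P.filter (fun j => pvLow j == c)) with h | h
      · exact hne (by rw [← h, habs])
      · have hmf := List.mem_filter.mp h
        have hlf : pvLow ((pvEntry anns c (P.filter (fun j => pvLow j == c))).1) = c := by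
          simpa using hmf.2
        rw [habs, hc0, low_idem] at hlf
        exact hne (hlf ▸ rfl)
    by_cases hck : pvCond anns k = true
    · have hall : ∀ a ∈ anns, pvLow a = pvLow k → a = k := (cond_iff anns k).mp hck
      have hc0S : c0 ∉ S := by
        rw [hSmem]
        rintro ⟨j, hjP, hjl⟩
        exact hkP ((hall j (hsubP j hjP) (by rw [hjl])) ▸ hjP)
      have hkfresh : m.contains (pvKeyA anns k) = false := by
        simp only [pvKeyA, hck, if_true]
        rw [PySem.Dict.contains_eq_decide_mem_keys, hkeys]
        simp only [decide_eq_false_iff_not, List.mem_map]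
        rintro ⟨c, hcS, hce⟩
        rcases pvEntry_fst anns c (P.filter (fun j => pvLow j == c)) with h | h
        · rw [hce] at h
          rcases (hSmem c).mp hcS with ⟨j, hjP, hjl⟩
          have : pvLow k = k := by
            conv_lhs => rw [h, ← hjl, low_idem]
            exact hjl ▸ h.symm ▸ rfl
          exact hkP ((hall j (hsubP j hjP) (by rw [hjl, ← h, this])) ▸ hjP)
        · rw [hce] at h
          exact hkP (List.mem_filter.mp h).1
      rw [PySem.Dict.items_insert_of_not_contains _ _ hkfresh, hm,
        PySem.Set.add_of_not_mem hc0S, List.map_append]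
      congr 1
      · apply List.map_congr_left
        intro c hcS
        rw [hfilter_ne c (fun h => hc0S (h ▸ hcS))]
      · have hPfil : P.filter (fun j => pvLow j == c0) = [] := by
          rw [List.filter_eq_nil_iff]
          intro j hj
          simp only [beq_iff_eq]
          intro h
          exact hkP ((hall j (hsubP j hj) (hc0 ▸ h)) ▸ hj)
        simp only [List.map_cons, List.map_nil, hfilter_eq, hPfil, List.nil_append]
        simp [pvEntry, pvKeyA, pvValA, hck]
    · have hckf : pvCond anns k = false := by simpa using hck
      simp only [pvKeyA, pvValA, hckf, Bool.false_eq_true, if_false]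
      by_cases hc0S : c0 ∈ S
      · -- the lowercase key is already present with the same value: overwrite keeps items
        have hgne : P.filter (fun j => pvLow j == c0) ≠ [] := by
          rcases (hSmem c0).mp hc0S with ⟨j, hjP, hjl⟩
          intro hnil
          have : j ∈ P.filter (fun j => pvLow j == c0) := by
            rw [List.mem_filter]
            exact ⟨hjP, by simp [hjl]⟩
          rw [hnil] at this
          simp at this
        have hold : pvEntry anns c0 (P.filter (fun j => pvLow j == c0)) = (c0, pvLowCnt anns c0) := by
          cases hg : P.filter (fun j => pvLow j == c0) with
          | nil => exact absurd hg hgne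
          | cons a t =>
            cases t with
            | nil =>
              have haP : a ∈ P ∧ pvLow a = c0 := by
                have : a ∈ P.filter (fun j => pvLow j == c0) := by rw [hg]; simp
                have h := List.mem_filter.mp this
                exact ⟨h.1, by simpa using h.2⟩
              by_cases hca : pvCond anns a = true
              · exfalso
                have := (cond_iff anns a).mp hca k hkanns (by rw [← hc0, haP.2])
                exact hkP (this ▸ haP.1)
              · simp [pvEntry, hca]
            | cons b t2 => rfl
        have hcont : m.contains c0 = true := by
          rw [PySem.Dict.contains_eq_decide_mem_keys, hkeys]
          simp only [decide_eq_true_eq, List.mem_map]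
          exact ⟨c0, hc0S, by rw [hold]⟩
        rw [PySem.Dict.items_insert_of_contains _ _ hcont, hm,
          PySem.Set.add_of_mem hc0S, List.map_map]
        apply List.map_congr_left
        intro c hcS
        simp only [Function.comp_apply]
        by_cases hcc : c = c0
        · subst hcc
          rw [hold]
          simp only [beq_self_eq_true, if_true]
          have hlen : (P.filter (fun j => pvLow j == c0) ++ [k]).length ≠ 1 := by
            cases hfoo : P.filter (fun j => pvLow j == c0) with
            | nil => exact absurd hfoo hgne
            | cons a t => simp
          rw [hfilter_eq, pvEntry_not_single _ _ _ hlen, ← hc0]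
        · rw [hfilter_ne c hcc]
          have hne := hkey_ne c hcS hcc
          have : ((pvEntry anns c (P.filter (fun j => pvLow j == c))).1 == c0) = false := by
            simp [hne]
          rw [this]
          simp
      · -- fresh lowercase key
        have hfresh : m.contains c0 = false := by
          rw [PySem.Dict.contains_eq_decide_mem_keys, hkeys]
          simp only [decide_eq_false_iff_not, List.mem_map]
          rintro ⟨c, hcS, hce⟩
          exact hkey_ne c hcS (fun h => hc0S (h ▸ hcS)) (hce ▸ rfl)
        rw [PySem.Dict.items_insert_of_not_contains _ _ hfresh, hm,
          PySem.Set.add_of_not_mem hc0S, List.map_append]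
        congr 1
        · apply List.map_congr_left
          intro c hcS
          rw [hfilter_ne c (fun h => hc0S (h ▸ hcS))]
        · have hPfil : P.filter (fun j => pvLow j == c0) = [] := by
            rw [List.filter_eq_nil_iff]
            intro j hj
            simp only [beq_iff_eq]
            intro h
            exact hc0S ((hSmem c0).mpr ⟨j, hj, h⟩)
          simp only [List.map_cons, List.map_nil, hfilter_eq, hPfil, List.nil_append]
          simp [pvEntry, hckf, ← hc0]

-- raw group under appending one annotation
theorem grp_append (l : List String) (a : String) (c : String) :
    pvGrp (l ++ [a]) c = pvGrp l c ++ if pvLow a == c then [a] else [] := by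
  unfold pvGrp
  rw [List.filter_append]
  congr 1
  rw [List.filter_cons]
  by_cases h : (pvLow a == c) = true
  · simp [h]
  · simp only [h, Bool.false_eq_true, if_false, List.filter_nil]

theorem grp_ne_nil_of_mem_classes (anns : List String) (c : String)
    (h : c ∈ pvClasses anns) : pvGrp anns c ≠ [] := by
  unfold pvClasses at h
  rw [PySem.Set.mem_ofList, List.mem_map] at h
  obtain ⟨a, ha, hla⟩ := h
  intro hnil
  have : a ∈ pvGrp anns c := by
    unfold pvGrp
    rw [List.mem_filter]
    exact ⟨ha, by simp [hla]⟩
  rw [hnil] at this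
  simp at this

-- characterization of B's single counting pass
theorem info_items (anns : List String) :
    (anns.foldl pvStep PySem.Dict.empty).items
      = (pvClasses anns).map (fun c => (c, pvInfoVal anns c)) := by
  induction anns using List.reverseRecOn with
  | nil => rfl
  | append_singleton l a ih =>
    rw [List.foldl_append, List.foldl_cons, List.foldl_nil]
    set I := l.foldl pvStep PySem.Dict.empty with hI
    have hkeys : I.keys = pvClasses l := by
      show I.items.map (fun p => p.1) = _
      rw [ih, List.map_map]
      simp [Function.comp_def]
    have hndk : I.keys.Nodup := by
      rw [hkeys]; exact PySem.Set.nodup_ofList _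
    have hcl : pvClasses (l ++ [a]) = PySem.Set.add (pvClasses l) (pvLow a) := by
      unfold pvClasses
      simp only [List.map_append, List.map_cons, List.map_nil]
      rw [PySem.Set.ofList_append_singleton]
    by_cases hmem : pvLow a ∈ pvClasses l
    · have hsome : I.get? (pvLow a) = some (pvInfoVal l (pvLow a)) := by
        rw [PySem.Dict.get?_eq_some_iff_mem_items I _ _ hndk, ih]
        exact List.mem_map_of_mem hmem
      have hcont : I.contains (pvLow a) = true := by
        rw [PySem.Dict.contains_eq_decide_mem_keys, hkeys]
        simp [hmem]
      rw [pvStep, hsome]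
      simp only
      rw [PySem.Dict.items_insert_of_contains _ _ hcont, ih, List.map_map,
        hcl, PySem.Set.add_of_mem hmem]
      apply List.map_congr_left
      intro c hc
      simp only [Function.comp_apply]
      by_cases hcc : c = pvLow a
      · subst hcc
        simp only [beq_self_eq_true, if_true]
        -- the class of a: group gains a at the end
        have hgne := grp_ne_nil_of_mem_classes l (pvLow a) hmem
        obtain ⟨y, t, hyt⟩ := List.exists_cons_of_ne_nil hgne
        have hgrp : pvGrp (l ++ [a]) (pvLow a) = pvGrp l (pvLow a) ++ [a] := by
          rw [grp_append]
          simp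
        unfold pvInfoVal
        rw [hgrp, hyt]
        simp only [List.cons_append, List.headD_cons, List.length_append, List.length_cons,
          List.all_append, List.all_cons, List.all_nil]
        refine Prod.ext rfl (Prod.ext ?_ ?_)
        · simp
        · by_cases hya : y = a
          · subst hya; simp
          · have h1 : (y != a) = true := by simp [hya]
            have h2 : (a == y) = false := by
              rw [beq_eq_false_iff_ne]
              exact fun h => hya h.symm
            simp [h1, h2]
      · have : ((c, pvInfoVal l c).1 == pvLow a) = false := by simp [hcc]
        rw [this]
        simp only [Bool.false_eq_true, if_false]
        have hgrp : pvGrp (l ++ [a]) c = pvGrp l c := by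
          rw [grp_append]
          have : (pvLow a == c) = false := by
            rw [beq_eq_false_iff_ne]
            exact fun h => hcc h.symm
          rw [this]
          simp
        unfold pvInfoVal
        rw [hgrp]
    · have hnone : I.get? (pvLow a) = none := by
        rw [PySem.Dict.get?_eq_none_iff_not_mem_keys, hkeys]
        exact hmem
      have hcont : I.contains (pvLow a) = false := by
        rw [PySem.Dict.contains_eq_decide_mem_keys, hkeys]
        simp [hmem]
      rw [pvStep, hnone]
      simp only
      rw [PySem.Dict.items_insert_of_not_contains _ _ hcont, ih,
        hcl, PySem.Set.add_of_not_mem hmem, List.map_append]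
      congr 1
      · apply List.map_congr_left
        intro c hc
        have hcc : c ≠ pvLow a := fun h => hmem (h ▸ hc)
        have hgrp : pvGrp (l ++ [a]) c = pvGrp l c := by
          rw [grp_append]
          have : (pvLow a == c) = false := by
            rw [beq_eq_false_iff_ne]
            exact fun h => hcc h.symm
          rw [this]
          simp
        unfold pvInfoVal
        rw [hgrp]
      · have hgl : pvGrp l (pvLow a) = [] := by
          unfold pvGrp
          rw [List.filter_eq_nil_iff]
          intro y hy hly
          have hlyeq : pvLow y = pvLow a := by simpa using hly
          apply hmem
          unfold pvClasses
          rw [PySem.Set.mem_ofList, ← hlyeq]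
          exact List.mem_map_of_mem hy
        have hgrp : pvGrp (l ++ [a]) (pvLow a) = [a] := by
          rw [grp_append, hgl]
          simp
        simp only [List.map_cons, List.map_nil]
        unfold pvInfoVal
        rw [hgrp]
        simp

-- B's emitted pair for a class equals A's merged entry for it
theorem emit_eq (anns : List String) (c : String) (hc : c ∈ pvClasses anns) :
    ((if (pvInfoVal anns c).2.2 then (pvInfoVal anns c).1 else c), (pvInfoVal anns c).2.1)
      = pvEntry anns c ((PySem.Set.ofList anns).filter (fun k => pvLow k == c)) := by
  set g := pvGrp anns c with hg
  set G := (PySem.Set.ofList anns).filter (fun k => pvLow k == c) with hG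
  have hgne : g ≠ [] := grp_ne_nil_of_mem_classes anns c hc
  obtain ⟨h0, t, hgt⟩ := List.exists_cons_of_ne_nil hgne
  have hhd : g.headD "" = h0 := by rw [hgt]; rfl
  have hmemg : ∀ x, x ∈ g ↔ x ∈ anns ∧ pvLow x = c := by
    intro x
    rw [hg]
    unfold pvGrp
    rw [List.mem_filter]
    simp
  have hh0 : h0 ∈ g := by rw [hgt]; simp
  have hh0anns : h0 ∈ anns := ((hmemg h0).mp hh0).1
  have hh0low : pvLow h0 = c := ((hmemg h0).mp hh0).2
  have hmemG : ∀ x, x ∈ G ↔ x ∈ anns ∧ pvLow x = c := by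
    intro x
    rw [hG, List.mem_filter, PySem.Set.mem_ofList]
    simp
  have hsnd : (pvInfoVal anns c).2.1 = pvLowCnt anns c := by
    rw [lowCnt_eq_grp_length]; rfl
  by_cases hall : g.all (fun a => a == g.headD "") = true
  · have halleq : ∀ x ∈ g, x = h0 := by
      intro x hx
      have := List.all_eq_true.mp hall x hx
      rw [hhd] at this
      simpa using this
    have hGsing : G = [h0] := by
      have hallG : ∀ x ∈ G, x = h0 := fun x hx =>
        halleq x ((hmemg x).mpr ((hmemG x).mp hx))
      have hh0G : h0 ∈ G := (hmemG h0).mpr ⟨hh0anns, hh0low⟩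
      have hndG : G.Nodup := (PySem.Set.nodup_ofList anns).filter _
      cases hGfoo : G with
      | nil => rw [hGfoo] at hh0G; simp at hh0G
      | cons y s =>
        have hy : y = h0 := hallG y (by rw [hGfoo]; simp)
        cases hs : s with
        | nil => rw [hy]
        | cons z s2 =>
          exfalso
          have hz : z = h0 := hallG z (by rw [hGfoo, hs]; simp)
          rw [hGfoo, hs, hy, hz] at hndG
          simp at hndG
    have hcond : pvCond anns h0 = true := by
      rw [cond_iff]
      intro x hx hlx
      exact halleq x ((hmemg x).mpr ⟨hx, by rw [hlx, hh0low]⟩)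
    have hcount : (anns.count h0 : Int) = pvLowCnt anns c := by
      rw [lowCnt_eq_grp_length, ← hg]
      congr 1
      rw [List.count_eq_countP, List.countP_eq_length_filter]
      congr 1
      rw [hg]
      unfold pvGrp
      apply List.filter_congr
      intro x hx
      by_cases hxh : x = h0
      · subst hxh
        simp [hh0low]
      · have h1 : (x == h0) = false := by simp [hxh]
        have h2 : (pvLow x == c) = false := by
          simp only [beq_eq_false_iff_ne, ne_eq]
          intro hlx
          exact hxh (halleq x ((hmemg x).mpr ⟨hx, hlx⟩))
        rw [h1, h2]
    rw [hGsing]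
    have hE : pvEntry anns c [h0] = (h0, (anns.count h0 : Int)) := by
      simp [pvEntry, hcond]
    rw [hE]
    have hfst : (pvInfoVal anns c).2.2 = true := hall
    rw [if_pos hfst]
    refine Prod.ext ?_ ?_
    · show (pvGrp anns c).headD "" = h0
      rw [← hg, hhd]
    · show (pvInfoVal anns c).2.1 = (anns.count h0 : Int)
      rw [hsnd, hcount]
  · have h22 : (pvInfoVal anns c).2.2 = g.all (fun a => a == g.headD "") := rfl
    have hallf : (pvInfoVal anns c).2.2 = false := by
      rw [h22]
      exact Bool.eq_false_iff.mpr hall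
    obtain ⟨y, hyg, hyne⟩ : ∃ y ∈ g, ¬ (y == g.headD "") = true := by
      have hfalse : g.all (fun a => a == g.headD "") = false := Bool.eq_false_iff.mpr hall
      rw [List.all_eq_false] at hfalse
      exact hfalse
    rw [hhd] at hyne
    have hyneh : y ≠ h0 := by simpa using hyne
    have hlen : G.length ≠ 1 := by
      intro h1
      obtain ⟨k, hk⟩ := List.length_eq_one_iff.mp h1
      have hyG : y ∈ G := (hmemG y).mpr ((hmemg y).mp hyg)
      have hhG : h0 ∈ G := (hmemG h0).mpr ⟨hh0anns, hh0low⟩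
      rw [hk] at hyG hhG
      simp at hyG hhG
      exact hyneh (hyG.trans hhG.symm)
    rw [pvEntry_not_single anns c G hlen, hallf]
    simp only [Bool.false_eq_true, if_false]
    exact Prod.ext rfl hsnd

-- keys of the merged items are pairwise distinct
theorem M_fst_low (anns : List String) (c : String) (hc : c ∈ pvClasses anns) :
    pvLow ((pvEntry anns c ((PySem.Set.ofList anns).filter (fun k => pvLow k == c))).1) = c := by
  rcases pvEntry_fst anns c ((PySem.Set.ofList anns).filter (fun k => pvLow k == c)) with h | h
  · rw [h]
    exact low_of_mem_classes anns c hc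
  · have := List.mem_filter.mp h
    simpa using this.2

theorem M_fst_nodup (anns : List String) : ((pvM anns).map (fun p => p.1)).Nodup := by
  apply List.Nodup.of_map pvLow
  unfold pvM
  rw [List.map_map, List.map_map]
  simp only [Function.comp_def]
  have : (pvClasses anns).map
      (fun c => pvLow ((pvEntry anns c ((PySem.Set.ofList anns).filter (fun k => pvLow k == c))).1))
      = pvClasses anns := by
    conv_rhs => rw [← List.map_id (pvClasses anns)]
    apply List.map_congr_left
    intro c hc
    exact M_fst_low anns c hc
  rw [this]
  exact PySem.Set.nodup_ofList _

-- insertBy equations and placement lemmas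
theorem insertBy_nil {α : Type} (bef : α → α → Bool) (x : α) :
    PySem.List.insertBy bef x [] = [x] := rfl

theorem insertBy_cons {α : Type} (bef : α → α → Bool) (x y : α) (l : List α) :
    PySem.List.insertBy bef x (y :: l)
      = if bef x y then x :: y :: l else y :: PySem.List.insertBy bef x l := rfl

theorem insertBy_skip {α : Type} (bef : α → α → Bool) (x : α) (A B : List α)
    (h : ∀ a ∈ A, bef x a = false) :
    PySem.List.insertBy bef x (A ++ B) = A ++ PySem.List.insertBy bef x B := by
  induction A with
  | nil => simp
  | cons a t ih =>
    rw [List.cons_append, insertBy_cons, h a (by simp)]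
    simp only [Bool.false_eq_true, if_false, List.cons_append]
    rw [ih (fun b hb => h b (by simp [hb]))]

theorem insertBy_front {α : Type} (bef : α → α → Bool) (x : α) (B : List α)
    (h : ∀ y ∈ B, bef x y = true) :
    PySem.List.insertBy bef x B = x :: B := by
  cases B with
  | nil => rfl
  | cons y t => rw [insertBy_cons, h y (by simp), if_pos rfl]

-- inserting x into the concatenated buckets of strictly descending distinct keys:
-- key already present: x lands at the end of its bucket
theorem ins_mem {α : Type} (key : α → Int) (x : α) (cs : List Int) (F : Int → List α)
    (hpair : cs.Pairwise (fun a b => b < a))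
    (hkey : ∀ c ∈ cs, ∀ y ∈ F c, key y = c)
    (hc0 : key x ∈ cs) :
    PySem.List.insertBy (fun a b => decide (key b < key a)) x (cs.flatMap F)
      = cs.flatMap (fun c => F c ++ if key x == c then [x] else []) := by
  induction cs with
  | nil => simp at hc0
  | cons c cs ih =>
    rw [List.flatMap_cons, List.flatMap_cons]
    have hpc := List.pairwise_cons.mp hpair
    by_cases hcc : key x = c
    · rw [insertBy_skip _ _ _ _ (fun y hy => by
        have := hkey c (by simp) y hy
        simp [this, hcc])]
      rw [insertBy_front _ _ _ (fun y hy => by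
        obtain ⟨c', hc', hyF⟩ := List.mem_flatMap.mp hy
        have hk := hkey c' (by simp [hc']) y hyF
        have hlt : c' < c := hpc.1 c' hc'
        simp only [decide_eq_true_eq, hk, hcc]
        exact hlt)]
      have hrest : cs.flatMap (fun c' => F c' ++ if key x == c' then [x] else [])
          = cs.flatMap F := by
        rw [List.flatMap_def, List.flatMap_def]
        congr 1
        apply List.map_congr_left
        intro c' hc'
        have hlt : c' < c := hpc.1 c' hc'
        have : (key x == c') = false := by
          simp only [beq_eq_false_iff_ne, ne_eq, hcc]
          omega
        rw [this]
        simp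
      rw [hrest]
      have : (key x == c) = true := by simp [hcc]
      rw [this]
      simp
    · have hx_cs : key x ∈ cs := by
        rcases List.mem_cons.mp hc0 with h | h
        · exact absurd h hcc
        · exact h
      rw [insertBy_skip _ _ _ _ (fun y hy => by
        have := hkey c (by simp) y hy
        have hxc : key x < c := hpc.1 _ hx_cs
        simp only [decide_eq_false_iff_not, not_lt, this]
        omega)]
      rw [ih hpc.2 (fun c' hc' => hkey c' (by simp [hc'])) hx_cs]
      have : (key x == c) = false := by simp [hcc]
      rw [this]
      simp

-- key not present: x lands between the buckets above and below it
theorem ins_not_mem {α : Type} (key : α → Int) (x : α) (cs : List Int) (F : Int → List α)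
    (hpair : cs.Pairwise (fun a b => b < a))
    (hkey : ∀ c ∈ cs, ∀ y ∈ F c, key y = c)
    (hc0 : key x ∉ cs) :
    PySem.List.insertBy (fun a b => decide (key b < key a)) x (cs.flatMap F)
      = (cs.takeWhile (fun c => decide (key x < c))).flatMap F
        ++ x :: (cs.dropWhile (fun c => decide (key x < c))).flatMap F := by
  induction cs with
  | nil => simp [insertBy_nil]
  | cons c cs ih =>
    have hpc := List.pairwise_cons.mp hpair
    by_cases hlt : key x < c
    · rw [List.flatMap_cons,
        insertBy_skip _ _ _ _ (fun y hy => by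
          have := hkey c (by simp) y hy
          simp only [decide_eq_false_iff_not, not_lt, this]
          omega),
        ih hpc.2 (fun c' hc' => hkey c' (by simp [hc'])) (fun h => hc0 (by simp [h])),
        List.takeWhile_cons_of_pos (by simpa using hlt),
        List.dropWhile_cons_of_pos (by simpa using hlt),
        List.flatMap_cons, List.append_assoc]
    · have hcx : c < key x := by
        have hne : c ≠ key x := fun h => hc0 (by simp [h])
        omega
      rw [insertBy_front _ _ _ (fun y hy => by
        obtain ⟨c', hc', hyF⟩ := List.mem_flatMap.mp hy
        have hk := hkey c' hc' y hyF
        have : c' ≤ c := by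
          rcases List.mem_cons.mp hc' with h | h
          · omega
          · have := hpc.1 c' h; omega
        simp only [decide_eq_true_eq, hk]
        omega),
        List.takeWhile_cons_of_neg (by simpa using hlt),
        List.dropWhile_cons_of_neg (by simpa using hlt)]
      simp

theorem drop_lt (c0 : Int) (cs : List Int)
    (hpair : cs.Pairwise (fun a b => b < a)) (hc0 : c0 ∉ cs) :
    ∀ d ∈ cs.dropWhile (fun c => decide (c0 < c)), d < c0 := by
  induction cs with
  | nil => simp
  | cons c cs ih =>
    have hpc := List.pairwise_cons.mp hpair
    by_cases hlt : c0 < c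
    · rw [List.dropWhile_cons_of_pos (by simpa using hlt)]
      exact ih hpc.2 (fun h => hc0 (by simp [h]))
    · rw [List.dropWhile_cons_of_neg (by simpa using hlt)]
      intro d hd
      have hcx : c < c0 := by
        have : c ≠ c0 := fun h => hc0 (by simp [h])
        omega
      rcases List.mem_cons.mp hd with h | h
      · omega
      · have := hpc.1 d h; omega

theorem sorted_rev_append_singleton {α : Type} (l : List α) (x : α) (key : α → Int) :
    PySem.List.sorted (l ++ [x]) key true
      = PySem.List.insertBy (fun a b => decide (key b < key a)) x
          (PySem.List.sorted l key true) := by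
  rw [PySem.List.sorted_rev_eq_foldl_insertBy, PySem.List.sorted_rev_eq_foldl_insertBy,
    List.foldl_append, List.foldl_cons, List.foldl_nil]

-- the distribution sort: buckets of the strictly decreasing distinct keys,
-- concatenated, equal Python's stable reverse sort
theorem bucket_sorted {α : Type} (l : List α) (key : α → Int) :
    PySem.List.sorted l key true
      = (PySem.List.sorted (PySem.Set.ofList (l.map key)) (fun c => c) true).flatMap
          (fun c => l.filter (fun y => key y == c)) := by
  induction l using List.reverseRecOn with
  | nil => simp [PySem.List.sorted_rev_eq_foldl_insertBy]
  | append_singleton l x ih =>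
    set cs' := PySem.List.sorted (PySem.Set.ofList (l.map key)) (fun c => c) true with hcs'
    have hperm : cs'.Perm (PySem.Set.ofList (l.map key)) :=
      PySem.List.sorted_perm _ _ true
    have hnd : cs'.Nodup := hperm.nodup_iff.mpr (PySem.Set.nodup_ofList _)
    have hpair : cs'.Pairwise (fun a b => b < a) := by
      have h1 := PySem.List.sorted_pairwise_rev (PySem.Set.ofList (l.map key)) (fun c => c)
      rw [← hcs'] at h1
      exact (h1.and hnd).imp (fun h => lt_of_le_of_ne h.1 (Ne.symm h.2))
    have hmemcs : ∀ c, c ∈ cs' ↔ c ∈ l.map key := by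
      intro c
      rw [hperm.mem_iff, PySem.Set.mem_ofList]
    have hkey : ∀ c ∈ cs', ∀ y ∈ l.filter (fun y => key y == c), key y = c := by
      intro c _ y hy
      simpa using (List.mem_filter.mp hy).2
    have hFnew : ∀ c, (l ++ [x]).filter (fun y => key y == c)
        = l.filter (fun y => key y == c) ++ if key x == c then [x] else [] := by
      intro c
      rw [List.filter_append]
      congr 1
      rw [List.filter_cons]
      by_cases h : (key x == c) = true
      · simp [h]
      · simp only [h, Bool.false_eq_true, if_false, List.filter_nil]
    have hsetnew : PySem.Set.ofList ((l ++ [x]).map key)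
        = PySem.Set.add (PySem.Set.ofList (l.map key)) (key x) := by
      simp only [List.map_append, List.map_cons, List.map_nil]
      rw [PySem.Set.ofList_append_singleton]
    rw [sorted_rev_append_singleton, ih]
    by_cases hmem : key x ∈ PySem.Set.ofList (l.map key)
    · have hc0cs : key x ∈ cs' := (hmemcs _).mpr ((PySem.Set.mem_ofList _ _).mp hmem)
      have h1 := ins_mem key x cs' (fun c => l.filter (fun y => key y == c)) hpair hkey hc0cs
      have h2 : PySem.List.sorted (PySem.Set.ofList ((l ++ [x]).map key)) (fun c => c) true
          = cs' := by
        rw [hsetnew, PySem.Set.add_of_mem hmem, hcs']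
      refine h1.trans ?_
      rw [h2, List.flatMap_def, List.flatMap_def]
      congr 1
      apply List.map_congr_left
      intro c _
      exact (hFnew c).symm
    · set T := cs'.takeWhile (fun c => decide (key x < c)) with hT
      set D := cs'.dropWhile (fun c => decide (key x < c)) with hD
      have hTD : T ++ D = cs' := List.takeWhile_append_dropWhile
      have hxcs : key x ∉ cs' := fun h => hmem ((PySem.Set.mem_ofList _ _).mpr ((hmemcs _).mp h))
      have hTgt : ∀ t ∈ T, key x < t := fun t ht => by
        have := List.mem_takeWhile_imp ht
        simpa using this
      have hDlt : ∀ d ∈ D, d < key x := drop_lt (key x) cs' hpair hxcs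
      have hcs_new : PySem.List.sorted (PySem.Set.ofList ((l ++ [x]).map key)) (fun c => c) true
          = T ++ key x :: D := by
        rw [hsetnew, PySem.Set.add_of_not_mem hmem]
        apply PySem.List.sorted_rev_eq_of_perm_of_pairwise_gt
        · have p1 : (key x :: D).Perm (D ++ [key x]) := (List.perm_append_singleton _ _).symm
          have p2 : (T ++ key x :: D).Perm (T ++ (D ++ [key x])) := List.Perm.append_left T p1
          have p4 : (T ++ (D ++ [key x])).Perm (PySem.Set.ofList (l.map key) ++ [key x]) := by
            rw [← List.append_assoc, hTD]
            exact hperm.append_right _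
          exact p2.trans p4
        · have hpTD : (T ++ D).Pairwise (fun a b => b < a) := by rw [hTD]; exact hpair
          have hsplit := List.pairwise_append.mp hpTD
          rw [List.pairwise_append]
          refine ⟨hsplit.1, ?_, ?_⟩
          · rw [List.pairwise_cons]
            exact ⟨hDlt, hsplit.2.1⟩
          · intro a ha b hb
            have hago : key x < a := hTgt a ha
            rcases List.mem_cons.mp hb with h | h
            · omega
            · have := hDlt b h; omega
      have h1 := ins_not_mem key x cs' (fun c => l.filter (fun y => key y == c)) hpair hkey hxcs
      refine h1.trans ?_
      rw [hcs_new, ← hT, ← hD, List.flatMap_append, List.flatMap_cons]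
      have hFT : T.flatMap (fun c => (l ++ [x]).filter (fun y => key y == c))
          = T.flatMap (fun c => l.filter (fun y => key y == c)) := by
        rw [List.flatMap_def, List.flatMap_def]
        congr 1
        apply List.map_congr_left
        intro c hc
        rw [hFnew c]
        have : (key x == c) = false := by
          have := hTgt c hc
          simp only [beq_eq_false_iff_ne, ne_eq]
          omega
        rw [this]
        simp
      have hFD : D.flatMap (fun c => (l ++ [x]).filter (fun y => key y == c))
          = D.flatMap (fun c => l.filter (fun y => key y == c)) := by
        rw [List.flatMap_def, List.flatMap_def]
        congr 1
        apply List.map_congr_left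
        intro c hc
        rw [hFnew c]
        have : (key x == c) = false := by
          have := hDlt c hc
          simp only [beq_eq_false_iff_ne, ne_eq]
          omega
        rw [this]
        simp
      have hFx : (l ++ [x]).filter (fun y => key y == key x) = [x] := by
        rw [hFnew]
        have hnil : l.filter (fun y => key y == key x) = [] := by
          rw [List.filter_eq_nil_iff]
          intro y hy hky
          apply hmem
          rw [PySem.Set.mem_ofList]
          have : key y = key x := by simpa using hky
          exact this ▸ List.mem_map_of_mem hy
        rw [hnil]
        simp
      rw [hFT, hFD, hFx]
      simp

-- dict built from a list with distinct keys keeps exactly that list as items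
theorem items_ofList_of_nodup {κ ν : Type} [BEq κ] [LawfulBEq κ] (S : List (κ × ν))
    (h : (S.map (fun p => p.1)).Nodup) : (PySem.Dict.ofList S).items = S := by
  unfold PySem.Dict.ofList PySem.Dict.update
  rw [PySem.Dict.items_foldl_insert_fresh S (fun p => p.1) (fun p => p.2) PySem.Dict.empty
    (fun p _ => PySem.Dict.contains_empty _) h]
  simp [show (PySem.Dict.empty : PySem.Dict κ ν).items = [] from rfl]

theorem foldl_append_fst (lt : List (String × String)) (acc : List String) :
    lt.foldl (fun acc annotation => acc ++ [annotation.1]) acc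
      = acc ++ lt.map (fun t => t.1) := by
  induction lt generalizing acc with
  | nil => simp
  | cons p t ih => simp [ih]

-- the common normal form: both ports return the merged items stably ordered by count
theorem A_eq_sorted (anns : List String) :
    (PySem.Dict.ofList (PySem.List.sorted
        ((PySem.Set.ofList anns).foldl
          (fun d k => d.insert (pvKeyA anns k) (pvValA anns k)) PySem.Dict.empty).items
        (fun p => p.2) true)).items
      = PySem.List.sorted (pvM anns) (fun p => p.2) true := by
  have hitems := mergeA_items anns (PySem.Set.ofList anns) (PySem.Set.nodup_ofList anns)
    (fun k hk => (PySem.Set.mem_ofList anns k).mp hk)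
  rw [hitems, classes_ofList]
  have hM : (pvClasses anns).map
      (fun c => pvEntry anns c ((PySem.Set.ofList anns).filter (fun k => pvLow k == c)))
      = pvM anns := rfl
  rw [hM]
  apply items_ofList_of_nodup
  have hp : ((PySem.List.sorted (pvM anns) (fun p => p.2) true).map (fun p => p.1)).Perm
      ((pvM anns).map (fun p => p.1)) := (PySem.List.sorted_perm _ _ true).map _
  exact hp.nodup_iff.mpr (M_fst_nodup anns)

theorem B_eq_sorted (anns : List String) :
    (let info := anns.foldl pvStep PySem.Dict.empty
     let buckets : PySem.Dict Int (List (String × Int)) :=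
       info.items.foldl (fun b p =>
         b.modify p.2.2.1 [] (fun l => l ++ [(if p.2.2.2 then p.2.1 else p.1, p.2.2.1)]))
         PySem.Dict.empty
     let out : PySem.Dict String Int :=
       (PySem.List.sorted buckets.keys (fun c => c) true).foldl (fun out c =>
         (buckets.getD c []).foldl (fun out kv => out.insert kv.1 kv.2) out) PySem.Dict.empty
     out.items)
      = PySem.List.sorted (pvM anns) (fun p => p.2) true := by
  simp only
  have hbuckets :
      ((anns.foldl pvStep PySem.Dict.empty).items.foldl (fun b p =>
          b.modify p.2.2.1 [] (fun l => l ++ [(if p.2.2.2 then p.2.1 else p.1, p.2.2.1)]))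
          PySem.Dict.empty)
        = (pvM anns).foldl (fun b m => b.modify m.2 [] (fun l => l ++ [m]))
            PySem.Dict.empty := by
    rw [info_items, List.foldl_map]
    rw [PySem.List.foldl_congr_mem (pvClasses anns) _
      (fun b c => b.modify
        (pvEntry anns c ((PySem.Set.ofList anns).filter (fun k => pvLow k == c))).2 []
        (fun l => l ++ [pvEntry anns c ((PySem.Set.ofList anns).filter (fun k => pvLow k == c))]))
      PySem.Dict.empty ?hcong]
    · unfold pvM
      rw [List.foldl_map]
    · intro b c hc
      have he := emit_eq anns c hc
      simp only
      rw [← he]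
  rw [hbuckets]
  set B := (pvM anns).foldl (fun b m => b.modify m.2 [] (fun l => l ++ [m]))
    PySem.Dict.empty with hB
  have hBmap : B = ((pvM anns).map (fun m => (m.2, m))).foldl
      (fun d p => d.modify p.1 [] (fun l => l ++ [p.2])) PySem.Dict.empty := by
    rw [List.foldl_map]
  have hkeys : B.keys = PySem.Set.ofList ((pvM anns).map (fun m => m.2)) := by
    rw [hB, PySem.Dict.keys_foldl_modify_key (pvM anns) (fun m => m.2) []
      (fun _ m l => l ++ [m]) PySem.Dict.empty]
    exact PySem.Set.update_nil_left _
  have hgetD : ∀ c, B.getD c [] = (pvM anns).filter (fun m => m.2 == c) := by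
    intro c
    rw [hBmap, PySem.Dict.getD_foldl_modify_append]
    simp [List.filter_map, List.map_map, Function.comp_def]
  have houter : (fun (out : PySem.Dict String Int) c =>
      (B.getD c []).foldl (fun out kv => out.insert kv.1 kv.2) out)
      = (fun out c => ((pvM anns).filter (fun m => m.2 == c)).foldl
          (fun out kv => out.insert kv.1 kv.2) out) := by
    funext o c
    rw [hgetD]
  rw [hkeys, houter, ← List.foldl_flatMap, ← bucket_sorted (pvM anns) (fun m => m.2)]
  have hnd : ((PySem.List.sorted (pvM anns) (fun p => p.2) true).map (fun p => p.1)).Nodup := by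
    have hp : ((PySem.List.sorted (pvM anns) (fun p => p.2) true).map (fun p => p.1)).Perm
        ((pvM anns).map (fun p => p.1)) := (PySem.List.sorted_perm _ _ true).map _
    exact hp.nodup_iff.mpr (M_fst_nodup anns)
  refine Eq.trans (PySem.Dict.items_foldl_insert_fresh
      (PySem.List.sorted (pvM anns) (fun m => m.2) true) (fun p => p.1) (fun p => p.2)
      PySem.Dict.empty (fun p _ => PySem.Dict.contains_empty _) hnd) ?_
  simp [show (PySem.Dict.empty : PySem.Dict String Int).items = [] from rfl]

theorem a_norm (lt : List (String × String)) :
    count_annotation lt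
      = PySem.List.sorted (pvM (lt.map (fun t => t.1))) (fun p => p.2) true := by
  simp only [count_annotation]
  rw [foldl_append_fst, List.nil_append, PySem.Dict.keys_counter]
  set anns := lt.map (fun t => t.1) with hanns
  simp only [PySem.Dict.getD_counter]
  have hstepA : (fun (merge_list : PySem.Dict String Int) (k_orig : String) =>
      if (((List.map PySem.Str.lower anns).count (PySem.Str.lower k_orig) : Int) ==
          ((anns.count k_orig : Int))) = true then
        merge_list.insert k_orig ((anns.count k_orig : Int))
      else
        merge_list.insert (PySem.Str.lower k_orig)
          (((List.map PySem.Str.lower anns).count (PySem.Str.lower k_orig) : Int)))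
      = (fun d k => d.insert (pvKeyA anns k) (pvValA anns k)) := by
    funext d k
    simp only [pvKeyA, pvValA, pvCond, pvLowCnt,
      show pvLow = PySem.Str.lower from rfl, beq_iff_eq, Int.natCast_inj]
    split_ifs <;> rfl
  rw [hstepA]
  exact A_eq_sorted anns

theorem b_norm (lt : List (String × String)) :
    count_annotation_alt lt
      = PySem.List.sorted (pvM (lt.map (fun t => t.1))) (fun p => p.2) true := by
  simp only [count_annotation_alt]
  have hfold : ((lt.map (fun t => t.1)).foldl pvStep PySem.Dict.empty)
      = lt.foldl (fun info t =>
          match info.get? (PySem.Str.lower t.1) with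
          | none => info.insert (PySem.Str.lower t.1) (t.1, 1, true)
          | some r => info.insert (PySem.Str.lower t.1)
              (r.1, r.2.1 + 1, if r.1 != t.1 then false else r.2.2))
          (PySem.Dict.empty : PySem.Dict String (String × Int × Bool)) := by
    rw [List.foldl_map]
    rfl
  rw [← hfold]
  exact B_eq_sorted (lt.map (fun t => t.1))

-- ===== VERDICT (by name: the statement is the Claim_ definition above) =====
theorem count_annotation_spec : Claim_equal_count_annotation := by
  intro list_tuple _hdom
  unfold Spec_count_annotation
  rw [a_norm, b_norm]
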